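-- pv_equiv track=rewrite | github.com/FlourishingHumanityCorporation/AutoTaskTracker | autotasktracker/dashboards/data/core/query_router.py | _is_data_query
-- ===== SOURCE A (Python) =====
-- def _is_data_query(query: str) -> bool:
--     """Check if query is a data retrieval query suitable for API."""
--     query_lower = query.lower().strip()
--
--     # Check for data retrieval patterns
--     data_patterns = [
--         'select', 'with', 'from entities', 'from metadata_entries',
--         'join', 'where', 'order by', 'limit'
--     ]
--
--     # Must be a SELECT query or CTE
--     if not (query_lower.startswith('select') or query_lower.startswith('with')):
--         return False
--
--     # Should contain data-related keywords
--     return any(pattern in query_lower for pattern in data_patterns)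
-- ===== SOURCE B (Python) =====
-- def _is_data_query(query: str) -> bool:
--     """Check if query is a data retrieval query suitable for API."""
--     # Single character-level pass: skip leading whitespace by index, then do a
--     # case-insensitive prefix match against each keyword.  (A's pattern scan is
--     # redundant: its guard prefixes are themselves patterns.)
--     n = len(query)
--     i = 0
--     while i < n and query[i].isspace():
--         i += 1
--     for kw in ('select', 'with'):
--         j = 0
--         while j < len(kw) and i + j < n and query[i + j].lower() == kw[j]:
--             j += 1
--         if j == len(kw):
--             return True
--     return False
-- ===== Notes on version B (the rewrite author's own statement) =====
-- stated objective: alternative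
-- what changed: Replaced A's lower/strip string pipeline plus redundant 8-pattern any() substring scan by a single index-based character pass: skip leading whitespace, then a char-by-char case-insensitive prefix match against 'select'/'with' (no lowered/stripped copies, no pattern list).
import Mathlib
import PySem

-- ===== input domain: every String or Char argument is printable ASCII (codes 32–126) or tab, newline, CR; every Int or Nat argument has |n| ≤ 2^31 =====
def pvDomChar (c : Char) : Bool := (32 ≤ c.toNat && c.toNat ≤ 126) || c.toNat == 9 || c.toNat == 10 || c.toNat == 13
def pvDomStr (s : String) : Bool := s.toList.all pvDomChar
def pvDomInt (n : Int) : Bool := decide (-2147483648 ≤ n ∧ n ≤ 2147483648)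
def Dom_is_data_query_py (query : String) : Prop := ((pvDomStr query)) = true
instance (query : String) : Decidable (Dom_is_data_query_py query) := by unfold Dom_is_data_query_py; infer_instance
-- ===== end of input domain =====

-- B replaces A's lower/strip pipeline + redundant pattern scan by a single char-level pass
-- (skip leading whitespace, case-insensitive prefix match); proved equal on Dom.


-- ===== PORT A =====
-- Port of A: lower+strip, guard on startswith select/with, then any-pattern scan.
def pvPatterns : List String :=
  ["select", "with", "from entities", "from metadata_entries",
   "join", "where", "order by", "limit"]

def is_data_query_py (query : String) : Bool :=
  let query_lower := PySem.Str.strip (PySem.Str.lower query)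
  if !(PySem.Str.startswith query_lower "select" || PySem.Str.startswith query_lower "with") then
    false
  else
    pvPatterns.any (fun p => PySem.Str.isIn p query_lower)

-- ===== PORT B =====
-- Port of B: skip leading whitespace chars (the `while … isspace()` loop), then for each
-- keyword a char-by-char case-insensitive prefix match (the inner `while` loop).
def pvSkipWs : List Char → List Char
  | [] => []
  | c :: cs => if PySem.Chars.isspace c then pvSkipWs cs else c :: cs

def pvMatchKw : List Char → List Char → Bool
  | _, [] => true
  | [], _ :: _ => false
  | c :: cs, k :: ks => if PySem.Chars.lowerChar c == k then pvMatchKw cs ks else false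

def is_data_query_py_alt (query : String) : Bool :=
  let cs := pvSkipWs query.toList
  pvMatchKw cs "select".toList || pvMatchKw cs "with".toList

-- ===== PRECONDITION & SPEC =====
def Spec_is_data_query_py (query : String) (out : Bool) : Prop := out = is_data_query_py_alt query
instance (query : String) (out : Bool) : Decidable (Spec_is_data_query_py query out) := by unfold Spec_is_data_query_py; infer_instance

-- ===== CLAIM (what is proved, stated in full; the proofs are below) =====
def Claim_equal_is_data_query_py : Prop := ∀ (query : String), Dom_is_data_query_py query → Spec_is_data_query_py query (is_data_query_py query)

-- ===== LEMMAS AND PROOFS =====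

-- A's guard implies its any-pattern scan: a prefix is an infix, and both guard
-- prefixes are among the patterns, so A's result equals its guard alone.
theorem pv_startswith_isIn (s p : List Char) (h : PySem.Chars.startswith s p = true) :
    PySem.Chars.isIn p s = true :=
  (PySem.Chars.isIn_iff_infix p s).mpr ((PySem.Chars.startswith_iff s p).mp h).isInfix

theorem pv_A_eq_guard (s : String) :
    (if !(PySem.Str.startswith s "select" || PySem.Str.startswith s "with") then false
     else pvPatterns.any (fun p => PySem.Str.isIn p s))
    = (PySem.Str.startswith s "select" || PySem.Str.startswith s "with") := by
  cases hsel : PySem.Chars.startswith s.toList "select".toList with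
  | true =>
    have := pv_startswith_isIn s.toList "select".toList hsel
    simp_all [pvPatterns]
  | false =>
    cases hw : PySem.Chars.startswith s.toList "with".toList with
    | true =>
      have := pv_startswith_isIn s.toList "with".toList hw
      simp_all [pvPatterns]
    | false => simp_all

-- B's whitespace loop is dropWhile isspace (= Python lstrip).
theorem pv_skipWs_eq (cs : List Char) :
    pvSkipWs cs = List.dropWhile PySem.Chars.isspace cs := by
  induction cs with
  | nil => rfl
  | cons c cs ih => simp [pvSkipWs, List.dropWhile]; split_ifs <;> simp_all

-- B's match loop is prefix test against the lowered string.
theorem pv_matchKw_eq (cs kw : List Char) :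
    pvMatchKw cs kw = PySem.Chars.startswith (PySem.Chars.lower cs) kw := by
  induction cs generalizing kw with
  | nil => cases kw <;> simp [pvMatchKw, PySem.Chars.startswith, PySem.Chars.lower, List.isPrefixOf]
  | cons c cs ih =>
    cases kw with
    | nil => simp [pvMatchKw, PySem.Chars.startswith, List.isPrefixOf]
    | cons k ks =>
      simp only [pvMatchKw, PySem.Chars.startswith, PySem.Chars.lower, List.map, List.isPrefixOf]
      have := ih ks
      simp only [PySem.Chars.startswith, PySem.Chars.lower] at this
      split_ifs with h
      · simp_all
      · have hk : (k == PySem.Chars.lowerChar c) = false := by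
          simp only [beq_eq_false_iff_ne, ne_eq]
          exact fun he => h (by simp [he])
        simp [hk]

-- lowering a char does not change whether it is whitespace
theorem pv_char_ofNat_toNat (n : Nat) (h : n < 55296) : (Char.ofNat n).toNat = n := by
  unfold Char.ofNat
  split
  · rfl
  · next hv => exact absurd (Or.inl h) hv

theorem pv_isspace_lowerChar (c : Char) :
    PySem.Chars.isspace (PySem.Chars.lowerChar c) = PySem.Chars.isspace c := by
  simp only [PySem.Chars.lowerChar]
  split_ifs with h
  · have hb : 65 ≤ c.toNat ∧ c.toNat ≤ 90 := by
      simp only [PySem.Chars.isupper, Bool.and_eq_true, decide_eq_true_eq, Char.le_def,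
        UInt32.le_iff_toNat_le] at h
      unfold Char.toNat
      exact h
    have hval : (Char.ofNat (c.toNat + 32)).toNat = c.toNat + 32 :=
      pv_char_ofNat_toNat _ (by omega)
    simp only [PySem.Chars.isspace, hval]
    rw [Bool.eq_iff_iff]
    simp only [Bool.or_eq_true, Bool.and_eq_true, decide_eq_true_eq]
    omega
  · rfl

-- lower commutes with dropWhile isspace
theorem pv_lower_dropWhile (cs : List Char) :
    PySem.Chars.lower (List.dropWhile PySem.Chars.isspace cs)
      = List.dropWhile PySem.Chars.isspace (PySem.Chars.lower cs) := by
  induction cs with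
  | nil => rfl
  | cons c cs ih =>
    cases hc : PySem.Chars.isspace c with
    | true => simpa [PySem.Chars.lower, List.dropWhile, hc, pv_isspace_lowerChar] using ih
    | false => simp [PySem.Chars.lower, List.dropWhile, hc, pv_isspace_lowerChar]

-- rstrip does not affect a prefix made of non-whitespace chars
theorem pv_prefix_rstrip_iff (kw z : List Char)
    (hkw : ∀ c ∈ kw, PySem.Chars.isspace c = false) :
    kw <+: PySem.Chars.rstrip z ↔ kw <+: z := by
  have hsplit : z = PySem.Chars.rstrip z ++ (List.takeWhile PySem.Chars.isspace z.reverse).reverse := by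
    simp only [PySem.Chars.rstrip]
    conv_lhs => rw [← z.reverse_reverse,
      ← List.takeWhile_append_dropWhile (p := PySem.Chars.isspace) (l := z.reverse)]
    rw [List.reverse_append]
  constructor
  · intro h
    exact h.trans ⟨(List.takeWhile PySem.Chars.isspace z.reverse).reverse, hsplit.symm⟩
  · intro h
    rcases List.prefix_or_prefix_of_prefix h
      (⟨(List.takeWhile PySem.Chars.isspace z.reverse).reverse, hsplit.symm⟩ :
        PySem.Chars.rstrip z <+: z) with h1 | h2
    · exact h1
    · rcases h2 with ⟨t, ht⟩
      cases t with
      | nil => rw [List.append_nil] at ht; exact ht ▸ List.prefix_rfl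
      | cons x xs =>
        exfalso
        have hxkw : x ∈ kw := by rw [← ht]; simp
        have hpre : x :: xs <+: (List.takeWhile PySem.Chars.isspace z.reverse).reverse := by
          have hkz : kw <+: PySem.Chars.rstrip z ++ (List.takeWhile PySem.Chars.isspace z.reverse).reverse :=
            hsplit ▸ h
          rw [← ht] at hkz
          exact (List.prefix_append_right_inj _).mp hkz
        have hxt := hpre.subset (List.mem_cons_self)
        have := List.mem_takeWhile_imp (List.mem_reverse.mp hxt)
        rw [hkw x hxkw] at this
        exact Bool.false_ne_true this

-- the core: A's guard for one keyword equals B's scan for that keyword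
theorem pv_guard_eq_scan (q : String) (kw : List Char)
    (hkw : ∀ c ∈ kw, PySem.Chars.isspace c = false) :
    PySem.Chars.startswith (PySem.Chars.strip (PySem.Chars.lower q.toList)) kw
      = pvMatchKw (pvSkipWs q.toList) kw := by
  rw [pv_matchKw_eq, pv_skipWs_eq]
  simp only [PySem.Chars.strip, PySem.Chars.lstrip, ← pv_lower_dropWhile]
  rw [Bool.eq_iff_iff, PySem.Chars.startswith_iff, PySem.Chars.startswith_iff]
  exact pv_prefix_rstrip_iff kw _ hkw

-- ===== VERDICT (by name: the statement is the Claim_ definition above) =====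
theorem is_data_query_py_spec : Claim_equal_is_data_query_py := by
  intro q _
  unfold Spec_is_data_query_py is_data_query_py is_data_query_py_alt
  rw [pv_A_eq_guard]
  have hs := pv_guard_eq_scan q "select".toList
    (by rw [show "select".toList = ['s','e','l','e','c','t'] by simp]
        intro c hc; fin_cases hc <;> rfl)
  have hw := pv_guard_eq_scan q "with".toList
    (by rw [show "with".toList = ['w','i','t','h'] by simp]
        intro c hc; fin_cases hc <;> rfl)
  simp only [PySem.Str.startswith_eq, PySem.Str.toList_strip, PySem.Str.toList_lower]
  rw [hs, hw]
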